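-- pv_equiv track=rewrite | github.com/Cookie1109/PersonalLearningWeb | backend/app/services/chat_service.py | _truncate_document_chat_history
-- ===== SOURCE A (Python) =====
-- DOCUMENT_CHAT_HISTORY_MAX_MESSAGES = 20
--
-- DOCUMENT_CHAT_HISTORY_MAX_CHARS = 18000
--
-- def _truncate_document_chat_history(history: list[dict[str, str]]) -> list[dict[str, str]]:
--     if not history:
--         return []
--
--     tail = history[-DOCUMENT_CHAT_HISTORY_MAX_MESSAGES :]
--     kept: list[dict[str, str]] = []
--     total_chars = 0
--     for item in reversed(tail):
--         item_len = len(item["content"])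
--         if kept and total_chars + item_len > DOCUMENT_CHAT_HISTORY_MAX_CHARS:
--             break
--         kept.append(item)
--         total_chars += item_len
--
--     kept.reverse()
--     return kept
-- ===== SOURCE B (Python) =====
-- DOCUMENT_CHAT_HISTORY_MAX_MESSAGES = 20
--
-- DOCUMENT_CHAT_HISTORY_MAX_CHARS = 18000
--
--
-- def _truncate_document_chat_history(history: list[dict[str, str]]) -> list[dict[str, str]]:
--     if not history:
--         return []
--
--     rev = history[-DOCUMENT_CHAT_HISTORY_MAX_MESSAGES:][::-1]
--     lens = [len(m["content"]) for m in rev]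
--     sums = [sum(lens[: i + 1]) for i in range(len(lens))]
--     keep = max(1, sum(1 for c in sums if c <= DOCUMENT_CHAT_HISTORY_MAX_CHARS))
--     return rev[:keep][::-1]
-- ===== Notes on version B (the rewrite author's own statement) =====
-- stated objective: alternative
-- what changed: Replaces A's streaming reverse loop with mutable accumulator and break by a prefix-sum table over the reversed tail's content lengths, a count of totals within the limit (forced to at least 1), and a slice back to chronological order; Pre_ excludes histories whose last-20 tail has a message without the 'content' key, on which both programs raise KeyError (except the rare >18000-char case where A's break fires before reaching it).
import Mathlib
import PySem

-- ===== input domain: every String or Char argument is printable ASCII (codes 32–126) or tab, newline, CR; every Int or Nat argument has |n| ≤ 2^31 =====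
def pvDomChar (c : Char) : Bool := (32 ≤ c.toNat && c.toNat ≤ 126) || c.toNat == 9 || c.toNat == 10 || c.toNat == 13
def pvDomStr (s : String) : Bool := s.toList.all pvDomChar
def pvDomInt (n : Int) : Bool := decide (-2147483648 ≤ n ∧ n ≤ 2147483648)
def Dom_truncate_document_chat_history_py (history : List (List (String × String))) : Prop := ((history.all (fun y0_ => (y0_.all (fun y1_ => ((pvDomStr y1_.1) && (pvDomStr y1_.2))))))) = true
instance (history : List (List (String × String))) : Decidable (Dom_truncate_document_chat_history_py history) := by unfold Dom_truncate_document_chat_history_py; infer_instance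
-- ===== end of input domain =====

-- B replaces A's streaming accumulate-and-break loop by a prefix-sum table over the
-- reversed tail plus a count/slice selection (alternative decomposition, same cost).


-- shared primitive: the dict lookup item["content"] (first match in the association list)
-- plus len(...); the .getD "" default is never reached on Pre_ inputs (key present).
def pvContentLen (item : List (String × String)) : Int :=
  PySem.Str.len (((item.find? (fun p => p.1 == "content")).map (·.2)).getD "")

-- ===== PORT A =====
-- the for-loop over reversed(tail) with kept/total state and the break
def pvLoopA (items kept : List (List (String × String))) (total : Int) :
    List (List (String × String)) :=
  match items with
  | [] => kept
  | item :: rest =>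
    let item_len := pvContentLen item
    if kept ≠ [] ∧ total + item_len > 18000 then kept
    else pvLoopA rest (kept ++ [item]) (total + item_len)

def truncate_document_chat_history_py (history : List (List (String × String))) : List (List (String × String)) :=
  if history = [] then []
  else
    let tail := PySem.List.slice history (some (-20)) none
    (pvLoopA tail.reverse [] 0).reverse

-- ===== PORT B =====
def truncate_document_chat_history_py_alt (history : List (List (String × String))) : List (List (String × String)) :=
  if history = [] then []
  else
    let rev := (PySem.List.slice history (some (-20)) none).reverse
    let lens := rev.map pvContentLen
    let sums := (List.range lens.length).map (fun i => (lens.take (i + 1)).sum)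
    let keep := max 1 (sums.countP (fun c => decide (c ≤ 18000)))
    (rev.take keep).reverse

-- ===== PRECONDITION & SPEC =====
-- Pre_ excludes histories where some message of the last-20 tail lacks the "content" key:
-- A raises KeyError on every such message it reaches (and may return only when its break
-- fires first), while B reads every tail message's length up front and raises there.
def Pre_truncate_document_chat_history_py (history : List (List (String × String))) : Prop :=
  ∀ item ∈ PySem.List.slice history (some (-20)) none,
    (item.find? (fun p => p.1 == "content")).isSome = true
instance (history : List (List (String × String))) : Decidable (Pre_truncate_document_chat_history_py history) := by unfold Pre_truncate_document_chat_history_py; infer_instance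

def pvWitness_truncate_document_chat_history_py : (List (List (String × String))) :=
  [[("content", "hello"), ("role", "user")], [("content", "hi")]]

def Spec_truncate_document_chat_history_py (history : List (List (String × String))) (out : List (List (String × String))) : Prop := out = truncate_document_chat_history_py_alt history
instance (history : List (List (String × String))) (out : List (List (String × String))) : Decidable (Spec_truncate_document_chat_history_py history out) := by unfold Spec_truncate_document_chat_history_py; infer_instance

-- ===== CLAIM (what is proved, stated in full; the proofs are below) =====
def Claim_equal_truncate_document_chat_history_py : Prop := ∀ (history : List (List (String × String))), Dom_truncate_document_chat_history_py history → Pre_truncate_document_chat_history_py history → Spec_truncate_document_chat_history_py history (truncate_document_chat_history_py history)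

-- ===== LEMMAS AND PROOFS =====

-- the streaming count: how many further items A keeps, given total so far
def pvCnt (ls : List Int) (t : Int) : Nat :=
  match ls with
  | [] => 0
  | l :: ls => if t + l > 18000 then 0 else 1 + pvCnt ls (t + l)

theorem pvContentLen_nonneg (item : List (String × String)) : 0 ≤ pvContentLen item := by
  simp [pvContentLen, PySem.Str.len_eq]

theorem pvCnt_of_gt (ls : List Int) (t : Int) (hnn : ∀ l ∈ ls, 0 ≤ l)
    (ht : t > 18000) : pvCnt ls t = 0 := by
  cases ls with
  | nil => rfl
  | cons l ls =>
    have h0 : 0 ≤ l := hnn l (by simp)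
    simp only [pvCnt]
    rw [if_pos (by omega)]

theorem pvLoopA_ne_nil (items : List (List (String × String)))
    (kept : List (List (String × String))) (total : Int) (h : kept ≠ []) :
    pvLoopA items kept total = kept ++ items.take (pvCnt (items.map pvContentLen) total) := by
  induction items generalizing kept total with
  | nil => simp [pvLoopA, pvCnt]
  | cons item rest ih =>
    simp only [pvLoopA, pvCnt, List.map_cons]
    by_cases hb : total + pvContentLen item > 18000
    · rw [if_pos ⟨h, hb⟩, if_pos hb]; simp
    · rw [if_neg (by tauto), if_neg hb]
      rw [ih _ _ (by simp), Nat.add_comm 1]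
      simp [List.take_succ_cons, List.append_assoc]

theorem pvCnt_eq_countP (ls : List Int) (t : Int) (hnn : ∀ l ∈ ls, 0 ≤ l) :
    pvCnt ls t =
      ((List.range ls.length).map (fun i => (ls.take (i + 1)).sum)).countP
        (fun c => decide (t + c ≤ 18000)) := by
  induction ls generalizing t with
  | nil => simp [pvCnt]
  | cons l ls ih =>
    have hnn' : ∀ x ∈ ls, 0 ≤ x := fun x hx => hnn x (by simp [hx])
    simp only [List.length_cons, List.range_succ_eq_map, List.map_cons, List.map_map,
      List.countP_cons]
    have hmap : ((List.range ls.length).map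
          ((fun i => ((l :: ls).take (i + 1)).sum) ∘ Nat.succ)).countP
          (fun c => decide (t + c ≤ 18000)) =
        ((List.range ls.length).map (fun i => (ls.take (i + 1)).sum)).countP
          (fun c => decide ((t + l) + c ≤ 18000)) := by
      rw [List.countP_map, List.countP_map]
      apply List.countP_congr
      intro i _
      simp [Function.comp, List.take_succ_cons]
      constructor <;> intro <;> omega
    rw [hmap]
    simp only [pvCnt]
    by_cases hb : t + l > 18000
    · rw [if_pos hb]
      have hz : ((List.range ls.length).map (fun i => (ls.take (i + 1)).sum)).countP
          (fun c => decide ((t + l) + c ≤ 18000)) = 0 := by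
        rw [List.countP_eq_zero]
        intro c hc
        simp only [List.mem_map] at hc
        obtain ⟨i, _, rfl⟩ := hc
        have : 0 ≤ (ls.take (i + 1)).sum :=
          List.sum_nonneg (fun x hx => hnn' x (List.mem_of_mem_take hx))
        simp; omega
      rw [hz]
      simp only [List.take_succ_cons, List.take_zero, List.sum_cons, List.sum_nil]
      simp
      omega
    · rw [if_neg hb, ih (t + l) hnn']
      have h2 : t + l ≤ 18000 := by omega
      simp [List.countP_map, h2]
      omega

theorem truncate_document_chat_history_py_eq (history : List (List (String × String))) :
    truncate_document_chat_history_py history = truncate_document_chat_history_py_alt history := by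
  by_cases hnil : history = []
  · simp [truncate_document_chat_history_py, truncate_document_chat_history_py_alt, hnil]
  · have hne : (PySem.List.slice history (some (-20)) none).reverse ≠ [] := by
      rw [PySem.List.slice_from_neg_ofNat history 20 (by omega)]
      simp only [ne_eq, List.reverse_eq_nil_iff, List.drop_eq_nil_iff]
      have hlen : history.length ≠ 0 := by simpa [List.length_eq_zero_iff] using hnil
      omega
    simp only [truncate_document_chat_history_py, truncate_document_chat_history_py_alt,
      if_neg hnil]
    generalize hg : (PySem.List.slice history (some (-20)) none).reverse = rev
    rw [hg] at hne
    cases rev with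
    | nil => exact absurd rfl hne
    | cons x rest =>
      have hnn : ∀ l ∈ (rest.map pvContentLen), 0 ≤ l := by
        intro l hl
        obtain ⟨item, _, rfl⟩ := List.mem_map.mp hl
        exact pvContentLen_nonneg item
      -- unfold one step of A's loop: kept = [] so the break test is skipped
      have hA : pvLoopA (x :: rest) [] 0 =
          [x] ++ rest.take (pvCnt (rest.map pvContentLen) (0 + pvContentLen x)) := by
        simp only [pvLoopA]
        rw [if_neg (by simp), pvLoopA_ne_nil _ _ _ (by simp)]
        simp
      rw [hA]
      -- B's count over the full prefix-sum table equals A's streaming count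
      have hcount : ((List.range ((x :: rest).map pvContentLen).length).map
            (fun i => (((x :: rest).map pvContentLen).take (i + 1)).sum)).countP
            (fun c => decide (c ≤ 18000)) =
          pvCnt ((x :: rest).map pvContentLen) 0 := by
        rw [pvCnt_eq_countP _ 0 (by
          intro l hl
          obtain ⟨item, _, rfl⟩ := List.mem_map.mp hl
          exact pvContentLen_nonneg item)]
        apply List.countP_congr
        intro c _
        simp
      rw [hcount]
      simp only [pvCnt, List.map_cons]
      by_cases hb : 0 + pvContentLen x > 18000
      · rw [if_pos hb]
        rw [pvCnt_of_gt _ _ hnn hb]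
        simp
      · rw [if_neg hb]
        have h1 : max 1 (1 + pvCnt (rest.map pvContentLen) (0 + pvContentLen x)) =
            1 + pvCnt (rest.map pvContentLen) (0 + pvContentLen x) := by omega
        rw [h1, Nat.add_comm 1]
        simp [List.take_succ_cons]

-- ===== VERDICT (by name: the statement is the Claim_ definition above) =====
theorem truncate_document_chat_history_py_spec : Claim_equal_truncate_document_chat_history_py := by
  intro history _ _
  unfold Spec_truncate_document_chat_history_py
  exact truncate_document_chat_history_py_eq history
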